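-- pv_equiv track=rewrite | github.com/vaadin/framework | scripts/GenerateBuildTestAndStagingReport.py | getAllowedArtifactPaths
-- ===== SOURCE A (Python) =====
-- def getAllowedArtifactPaths(allowedArtifacts):
--     result = []
--     for artifact in allowedArtifacts:
--         parts = artifact.split('/', 1)
--         result.append(parts[0])
--         if len(parts) > 1:
--             subart = getAllowedArtifactPaths([ parts[1] ])
--             subArtifacts = list(map(lambda x: parts[0] + '/' + x, subart))
--             result.extend(subArtifacts)
--     return result
-- ===== SOURCE B (Python) =====
-- def getAllowedArtifactPaths(allowedArtifacts):
--     # One pass per artifact: split once on '/', accumulate the running prefix.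
--     result = []
--     for artifact in allowedArtifacts:
--         segs = artifact.split('/')
--         prefix = segs[0]
--         result.append(prefix)
--         for seg in segs[1:]:
--             prefix = prefix + '/' + seg
--             result.append(prefix)
--     return result
-- ===== Notes on version B (the rewrite author's own statement) =====
-- stated objective: simpler
-- what changed: Replaces A's recursive split('/',1) that re-maps ('prefix/'+x) over every sub-result at every level with a single split('/') per artifact and an iterative accumulation of the running prefix.
import Mathlib
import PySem

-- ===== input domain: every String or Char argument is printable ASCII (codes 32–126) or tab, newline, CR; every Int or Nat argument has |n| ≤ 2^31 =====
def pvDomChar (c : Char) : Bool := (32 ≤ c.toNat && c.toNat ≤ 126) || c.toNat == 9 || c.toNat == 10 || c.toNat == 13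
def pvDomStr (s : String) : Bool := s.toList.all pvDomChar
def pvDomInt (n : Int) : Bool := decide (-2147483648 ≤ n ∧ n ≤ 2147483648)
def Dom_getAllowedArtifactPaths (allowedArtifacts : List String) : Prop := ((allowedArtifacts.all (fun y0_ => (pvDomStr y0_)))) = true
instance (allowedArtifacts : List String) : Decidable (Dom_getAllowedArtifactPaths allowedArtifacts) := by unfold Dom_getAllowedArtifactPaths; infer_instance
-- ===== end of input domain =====

-- B lists each artifact's '/'-prefixes in one pass (split once, accumulate the running
-- prefix) instead of A's recursive split('/',1) with a re-mapped sublist per level.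
-- Both ports work over List Char and rebuild Strings at the end (exact: same code points).

-- ===== PORT A =====

-- artifact.split('/', 1), hand-ported exactly: text before the first '/',
-- and (if a '/' exists) the remainder after it.
def pvSplitOnce : List Char → List Char × Option (List Char)
  | [] => ([], none)
  | c :: rest =>
    if c = '/' then ([], some rest)
    else
      let r := pvSplitOnce rest
      (c :: r.1, r.2)

theorem pvSplitOnce_some_length (cs p q : List Char) (h : pvSplitOnce cs = (p, some q)) :
    cs.length = p.length + 1 + q.length := by
  induction cs generalizing p q with
  | nil => simp [pvSplitOnce] at h
  | cons c rest ih =>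
    by_cases hc : c = '/'
    · simp [pvSplitOnce, hc] at h
      obtain ⟨hp, hq⟩ := h
      subst hp; subst hq; simp; omega
    · simp [pvSplitOnce, hc] at h
      obtain ⟨hp, hq⟩ := h
      rcases hr : pvSplitOnce rest with ⟨p', t⟩
      rw [hr] at hp hq
      cases t with
      | none => simp at hq
      | some q' =>
        simp at hp hq
        subst hp
        have := ih p' q (by rw [hr]; simp [hq])
        simp [this]
        omega

-- the recursion of A: loop over the artifact list, per artifact split('/',1),
-- recursive call on the singleton tail, re-prefix the sub-results.
def pvGoA : List (List Char) → List (List Char)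
  | [] => []
  | cs :: rest =>
    match h : pvSplitOnce cs with
    | (p, none) => p :: pvGoA rest
    | (p, some q) =>
      let subart := pvGoA [q]
      let subArtifacts := subart.map (fun x => p ++ '/' :: x)
      (p :: subArtifacts) ++ pvGoA rest
termination_by xss => (xss.map (fun cs => cs.length + 1)).sum
decreasing_by
  all_goals simp
  all_goals (have := pvSplitOnce_some_length cs p q h; omega)

def getAllowedArtifactPaths (allowedArtifacts : List String) : List String :=
  (pvGoA (allowedArtifacts.map String.toList)).map String.ofList

-- ===== PORT B =====

-- artifact.split('/'), hand-ported exactly: all '/'-separated segments.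
def pvSplitAll : List Char → List (List Char)
  | [] => [[]]
  | c :: rest =>
    if c = '/' then [] :: pvSplitAll rest
    else
      match pvSplitAll rest with
      | [] => [[c]]
      | s :: ss => (c :: s) :: ss

-- inner loop of B: extend the running prefix with each remaining segment.
def pvScan (prefixAcc : List Char) : List (List Char) → List (List Char)
  | [] => []
  | seg :: segs =>
    let p := prefixAcc ++ '/' :: seg
    p :: pvScan p segs

-- per-artifact body of B: first segment, then the running prefixes.
def pvPrefixes (cs : List Char) : List (List Char) :=
  match pvSplitAll cs with
  | [] => []          -- unreachable: split never returns an empty list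
  | s :: ss => s :: pvScan s ss

def getAllowedArtifactPaths_alt (allowedArtifacts : List String) : List String :=
  ((allowedArtifacts.map String.toList).flatMap pvPrefixes).map String.ofList

-- ===== PRECONDITION & SPEC =====
def Spec_getAllowedArtifactPaths (allowedArtifacts : List String) (out : List String) : Prop := out = getAllowedArtifactPaths_alt allowedArtifacts
instance (allowedArtifacts : List String) (out : List String) : Decidable (Spec_getAllowedArtifactPaths allowedArtifacts out) := by unfold Spec_getAllowedArtifactPaths; infer_instance

-- ===== CLAIM (what is proved, stated in full; the proofs are below) =====
def Claim_equal_getAllowedArtifactPaths : Prop := ∀ (allowedArtifacts : List String), Dom_getAllowedArtifactPaths allowedArtifacts → Spec_getAllowedArtifactPaths allowedArtifacts (getAllowedArtifactPaths allowedArtifacts)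

-- ===== LEMMAS AND PROOFS =====

theorem pvSplitAll_of_splitOnce_none (cs p : List Char) (h : pvSplitOnce cs = (p, none)) :
    pvSplitAll cs = [p] := by
  induction cs generalizing p with
  | nil => simp [pvSplitOnce] at h; simp [pvSplitAll, h]
  | cons c rest ih =>
    by_cases hc : c = '/'
    · simp [pvSplitOnce, hc] at h
    · rcases hr : pvSplitOnce rest with ⟨p', t⟩
      simp [pvSplitOnce, hc, hr] at h
      cases t with
      | none =>
        obtain ⟨hp, -⟩ := h
        have := ih p' hr
        simp [pvSplitAll, hc, this, ← hp]
      | some q => simp at h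

theorem pvSplitAll_of_splitOnce_some (cs p q : List Char) (h : pvSplitOnce cs = (p, some q)) :
    pvSplitAll cs = p :: pvSplitAll q := by
  induction cs generalizing p q with
  | nil => simp [pvSplitOnce] at h
  | cons c rest ih =>
    by_cases hc : c = '/'
    · simp [pvSplitOnce, hc] at h
      obtain ⟨hp, hq⟩ := h
      subst hq
      simp [pvSplitAll, hc, ← hp]
    · rcases hr : pvSplitOnce rest with ⟨p', t⟩
      simp [pvSplitOnce, hc, hr] at h
      cases t with
      | none => simp at h
      | some q' =>
        obtain ⟨hp, hq⟩ := h
        simp at hq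
        have := ih p' q (by rw [hr, hq])
        simp [pvSplitAll, hc, this, ← hp]

theorem pvScan_map (p : List Char) (segs : List (List Char)) (s : List Char) :
    (pvScan s segs).map (fun x => p ++ '/' :: x) = pvScan (p ++ '/' :: s) segs := by
  induction segs generalizing s with
  | nil => simp [pvScan]
  | cons seg segs ih =>
    simp only [pvScan, List.map_cons, ih]
    simp

theorem pvGoA_singleton (cs : List Char) : pvGoA [cs] = pvPrefixes cs := by
  rcases h : pvSplitOnce cs with ⟨p, t⟩
  cases t with
  | none =>
    rw [pvGoA, h, pvGoA]
    unfold pvPrefixes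
    rw [pvSplitAll_of_splitOnce_none cs p h]
    simp [pvScan]
  | some q =>
    have hlen := pvSplitOnce_some_length cs p q h
    rw [pvGoA, h]
    have ih := pvGoA_singleton q
    rw [pvGoA]
    unfold pvPrefixes
    rw [pvSplitAll_of_splitOnce_some cs p q h]
    rcases hq : pvSplitAll q with _ | ⟨s, ss⟩
    · simp [ih, pvPrefixes, hq, pvScan]
    · simp only [ih, pvPrefixes, hq, List.map_cons, pvScan_map]
      simp [pvScan]
termination_by cs.length
decreasing_by
  have := pvSplitOnce_some_length cs p q h
  omega

theorem pvGoA_cons (cs : List Char) (rest : List (List Char)) :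
    pvGoA (cs :: rest) = pvGoA [cs] ++ pvGoA rest := by
  rcases h : pvSplitOnce cs with ⟨p, t⟩
  cases t with
  | none => rw [pvGoA, h, pvGoA, h, pvGoA]; simp
  | some q => rw [pvGoA, h, pvGoA, h, pvGoA]; simp

theorem pvGoA_eq_flatMap (xss : List (List Char)) :
    pvGoA xss = xss.flatMap pvPrefixes := by
  induction xss with
  | nil => rw [pvGoA]; simp
  | cons cs rest ih =>
    rw [pvGoA_cons, pvGoA_singleton, ih, List.flatMap_cons]

-- ===== VERDICT (by name: the statement is the Claim_ definition above) =====
theorem getAllowedArtifactPaths_spec : Claim_equal_getAllowedArtifactPaths := by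
  intro allowedArtifacts _
  unfold Spec_getAllowedArtifactPaths getAllowedArtifactPaths getAllowedArtifactPaths_alt
  rw [pvGoA_eq_flatMap]
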